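-- pv_equiv track=rewrite | github.com/piahh/Graphentheorie | scripts/GermanDrama_new.py | checkForDoubles
-- ===== SOURCE A (Python) =====
-- def checkForDoubles(String):
--     # Prüft ob mehrere Personen gleichzeitig sprechen;
--     # Rückgabe Liste der sprechenden Pers. : "#Anna #Berta" -> ["#Anna", "#Berta"]
--     stringList = []
--     y = len(String)
--     x = 0
--     for i in range(len(String)-1, -1, -1):
--         if String[i] == "#":
--             x = i
--             stringList.append(String[x:y])
--             y = x-1
--     return stringList
-- ===== SOURCE B (Python) =====
-- def checkForDoubles(String):
--     positions = [i for i, c in enumerate(String) if c == "#"]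
--     n = len(String)
--     out = []
--     for k in range(len(positions) - 1, -1, -1):
--         end = n if k == len(positions) - 1 else positions[k + 1] - 1
--         out.append(String[positions[k]:end])
--     return out
-- ===== Notes on version B (the rewrite author's own statement) =====
-- stated objective: alternative
-- what changed: B replaces A's single reverse scan with threaded slice-boundary state by two passes: a forward enumerate pass collecting all hash-mark positions, then a separate reverse slicing pass whose end bounds are computed from the position table instead of loop-carried variables.
import Mathlib
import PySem

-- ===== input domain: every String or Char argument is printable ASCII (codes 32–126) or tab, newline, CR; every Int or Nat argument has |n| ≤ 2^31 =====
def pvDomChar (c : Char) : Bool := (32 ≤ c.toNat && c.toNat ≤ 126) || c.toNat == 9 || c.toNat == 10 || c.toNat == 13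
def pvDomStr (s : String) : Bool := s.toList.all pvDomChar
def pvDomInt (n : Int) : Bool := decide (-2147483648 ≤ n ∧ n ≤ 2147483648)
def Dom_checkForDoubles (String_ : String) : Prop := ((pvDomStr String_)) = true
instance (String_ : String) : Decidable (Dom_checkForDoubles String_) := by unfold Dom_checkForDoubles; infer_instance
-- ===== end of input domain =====

-- B collects all '#' positions in one forward pass, then slices in a second reverse pass;
-- same return value as A's single reverse scan (objective: alternative decomposition, same cost).

-- ===== PORT A =====
-- literal transliteration of A: reverse scan, state (stringList, y, x)
def checkForDoubles (String_ : String) : List String :=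
  let n : Int := PySem.Str.len String_
  let r := (PySem.List.pyRange (n - 1) (-1) (-1)).foldl
    (fun (st : List String × Int × Int) i =>
      match PySem.Str.pyGet? String_ i with
      | some c =>
        if c = '#' then
          let x := i
          (st.1 ++ [PySem.Str.slice String_ (some x) (some st.2.1)], x - 1, x)
        else st
      | none => st)
    ([], n, 0)
  r.1

-- ===== PORT B =====
-- literal transliteration of B: positions comprehension, then reverse indexing pass
def checkForDoubles_alt (String_ : String) : List String :=
  let positions : List Int := (PySem.List.enumerate String_.toList 0).filterMap
    (fun p => if p.2 = '#' then some p.1 else none)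
  let n : Int := PySem.Str.len String_
  let m : Int := (positions.length : Int)
  (PySem.List.pyRange (m - 1) (-1) (-1)).foldl
    (fun out k =>
      let e : Int := if k = m - 1 then n else PySem.List.pyGetD positions (k + 1) 0 - 1
      out ++ [PySem.Str.slice String_ (some (PySem.List.pyGetD positions k 0)) (some e)])
    []

-- ===== PRECONDITION & SPEC =====
def Spec_checkForDoubles (String_ : String) (out : List String) : Prop := out = checkForDoubles_alt String_
instance (String_ : String) (out : List String) : Decidable (Spec_checkForDoubles String_ out) := by unfold Spec_checkForDoubles; infer_instance

-- ===== CLAIM (what is proved, stated in full; the proofs are below) =====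
def Claim_equal_checkForDoubles : Prop := ∀ (String_ : String), Dom_checkForDoubles String_ → Spec_checkForDoubles String_ (checkForDoubles String_)

-- ===== LEMMAS AND PROOFS =====

-- the common characterisation: given the descending list of '#' positions, both programs
-- produce slice p y, threading y := p - 1
def pvChunks (s : String) : List Int → Int → List String
  | [], _ => []
  | p :: rest, y => PySem.Str.slice s (some p) (some y) :: pvChunks s rest (p - 1)

theorem pvFoldA (s : String) (l : List Int) :
    ∀ (acc : List String) (y x : Int),
    (l.foldl
      (fun (st : List String × Int × Int) i =>
        match PySem.List.pyGet? s.toList i with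
        | some c =>
          if c = '#' then
            (st.1 ++ [PySem.Str.slice s (some i) (some st.2.1)], i - 1, i)
          else st
        | none => st)
      (acc, y, x)).1
    = acc ++ pvChunks s (l.filter (fun i => PySem.List.pyGet? s.toList i == some '#')) y := by
  induction l with
  | nil => intro acc y x; simp [pvChunks]
  | cons i l ih =>
    intro acc y x
    simp only [List.foldl_cons, List.filter_cons]
    cases h : PySem.List.pyGet? s.toList i with
    | none => simpa [h] using ih acc y x
    -- (the 'none' arm is unreachable for in-range i; the port keeps it for the match)
    | some c =>
      by_cases hc : c = '#'
      · subst hc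
        simp only [h]
        rw [ih]
        simp [pvChunks]
      · simp only [h]
        rw [if_neg hc, ih]
        simp [hc]


theorem pvMapB (s : String) (qs : List Int) : ∀ (y : Int),
    (PySem.List.pyRange ((qs.length : Int) - 1) (-1) (-1)).map
      (fun k => PySem.Str.slice s (some (PySem.List.pyGetD qs k 0))
        (some (if k = (qs.length : Int) - 1 then y else PySem.List.pyGetD qs (k + 1) 0 - 1)))
    = pvChunks s qs.reverse y := by
  induction qs using List.reverseRecOn with
  | nil =>
    intro y
    rw [PySem.List.pyRange_neg_one_eq_nil (by simp : ((([] : List Int).length : Int) - 1) ≤ -1)]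
    simp [pvChunks]
  | append_singleton qs' q ih =>
    intro y
    have hlen : ((qs' ++ [q]).length : Int) = (qs'.length : Int) + 1 := by simp
    have h1 : ((qs' ++ [q]).length : Int) - 1 = ((qs'.length : Nat) : Int) := by omega
    rw [PySem.List.pyRange_neg_one_cons (by omega : (-1 : Int) < ((qs' ++ [q]).length : Int) - 1)]
    rw [h1]
    simp only [List.map_cons, List.reverse_append, List.reverse_singleton,
      List.singleton_append, pvChunks]
    congr 1
    · -- head: index length-1 picks q, end is y
      simp [PySem.List.pyGetD_natCast, List.getD_eq_getElem?_getD]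
    · -- tail: the remaining indices never read q's slot as start, only as the k+1 end
      rw [← ih (q - 1)]
      apply List.map_congr_left
      intro k hk
      have hk' := (PySem.List.mem_pyRange_neg_one).1 hk
      obtain ⟨j, rfl, hj⟩ : ∃ j : Nat, (j : Int) = k ∧ j < qs'.length := by
        refine ⟨k.toNat, ?_, ?_⟩ <;> omega
      have hne : ((j : Int)) ≠ ((qs'.length : Nat) : Int) := by
        exact_mod_cast Nat.ne_of_lt hj
      have hgk : PySem.List.pyGetD (qs' ++ [q]) (j : Int) 0 = PySem.List.pyGetD qs' (j : Int) 0 := by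
        simp [PySem.List.pyGetD_natCast, List.getD_eq_getElem?_getD, List.getElem?_append_left hj]
      rw [hgk, if_neg hne]
      by_cases hj1 : (j : Int) = (qs'.length : Int) - 1
      · -- new top index: its end comes from q's slot
        have hq : PySem.List.pyGetD (qs' ++ [q]) ((j : Int) + 1) 0 = q := by
          have h2 : (j : Int) + 1 = ((qs'.length : Nat) : Int) := by omega
          rw [h2, PySem.List.pyGetD_natCast, List.getD_eq_getElem?_getD]
          simp
        rw [if_pos hj1, hq]
      · have hj2 : j + 1 < qs'.length := by omega
        have hq : PySem.List.pyGetD (qs' ++ [q]) ((j : Int) + 1) 0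
            = PySem.List.pyGetD qs' ((j : Int) + 1) 0 := by
          have h2 : (j : Int) + 1 = (((j + 1 : Nat)) : Int) := by omega
          rw [h2, PySem.List.pyGetD_natCast, PySem.List.pyGetD_natCast,
            List.getD_eq_getElem?_getD, List.getD_eq_getElem?_getD,
            List.getElem?_append_left hj2]
        rw [if_neg hj1, hq]

-- the two programs enumerate the same '#' positions: B's forward comprehension, reversed,
-- is A's descending filtered range
theorem pvPositions (s : String) :
    ((PySem.List.enumerate s.toList 0).filterMap
      (fun p => if p.2 = '#' then some p.1 else none)).reverse
    = (PySem.List.pyRange ((s.toList.length : Int) - 1) (-1) (-1)).filter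
        (fun i => PySem.List.pyGet? s.toList i == some '#') := by
  have h0 : ((s.toList.length : Int) - 1) = ((-1 : Int)) + (s.toList.length : Int) := by omega
  rw [PySem.List.enumerate_eq_map_pyRange s.toList '#', h0,
    PySem.List.pyRange_neg_one_eq_reverse]
  simp only [List.filterMap_map, List.filter_reverse, PySem.List.len_eq, Function.comp_def]
  have h2 : ((-1 : Int)) + (s.toList.length : Int) + 1 = (s.toList.length : Int) := by omega
  rw [h2, neg_add_cancel]
  congr 1
  suffices h : ∀ l : List Int,
      (∀ i ∈ l, PySem.List.pyGet? s.toList i = some (PySem.List.pyGetD s.toList i '#')) →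
      l.filterMap (fun j => if PySem.List.pyGetD s.toList j '#' = '#' then some j else none)
      = l.filter (fun i => PySem.List.pyGet? s.toList i == some '#') by
    refine h _ ?_
    intro i hi
    have hi' := (PySem.List.mem_pyRange_one).1 hi
    obtain ⟨h0i, h1i⟩ := hi'
    rw [PySem.List.pyGetD_eq_getElem s.toList '#' h0i h1i,
      PySem.List.pyGet?_eq_some_getElem s.toList h0i h1i]
  intro l hl
  induction l with
  | nil => simp
  | cons i l ih =>
    have hi := hl i (by simp)
    have ih' := ih (fun j hj => hl j (by simp [hj]))
    simp only [List.filterMap_cons, List.filter_cons, hi]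
    by_cases hc : PySem.List.pyGetD s.toList i '#' = '#'
    · simp [hc, ih']
    · simp [hc, ih']

theorem pvFoldAppend (l : List Int) (f : Int → String) :
    ∀ acc : List String,
    l.foldl (fun out k => out ++ [f k]) acc = acc ++ l.map f := by
  induction l with
  | nil => intro acc; simp
  | cons k l ih => intro acc; simp [ih]

-- ===== VERDICT (by name: the statement is the Claim_ definition above) =====
theorem checkForDoubles_spec : Claim_equal_checkForDoubles := by
  intro s _
  unfold Spec_checkForDoubles checkForDoubles checkForDoubles_alt
  simp only [PySem.Str.len_eq, PySem.Str.pyGet?_eq, PySem.Chars.pyGet?_eq_listPyGet?]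
  rw [pvFoldA s _ [] _ 0, pvFoldAppend _
    (fun k => PySem.Str.slice s
      (some (PySem.List.pyGetD ((PySem.List.enumerate s.toList 0).filterMap
        (fun p => if p.2 = '#' then some p.1 else none)) k 0))
      (some (if k = (((PySem.List.enumerate s.toList 0).filterMap
          (fun p => if p.2 = '#' then some p.1 else none)).length : Int) - 1
        then (s.toList.length : Int)
        else PySem.List.pyGetD ((PySem.List.enumerate s.toList 0).filterMap
          (fun p => if p.2 = '#' then some p.1 else none)) (k + 1) 0 - 1))),
    pvMapB, ← pvPositions s]
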